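-- pv_equiv track=rewrite | github.com/udilerner99/My_Notes | csv_work/python_sample/sample_5.py | employees_with_multiple_managers
-- ===== SOURCE A (Python) =====
-- def employees_with_multiple_managers(records: list[tuple[str, int]]) -> list[str]:
--     emp_to_managers = {}
--
--     for emp, mgr in records:
--         if emp not in emp_to_managers:
--             emp_to_managers[emp] = set()
--         emp_to_managers[emp].add(mgr)
--
--     result = [emp for emp, mgrs in emp_to_managers.items() if len(mgrs) > 1]
--
--     return sorted(result)
-- ===== SOURCE B (Python) =====
-- def employees_with_multiple_managers(records: list[tuple[str, int]]) -> list[str]: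
--     # Sort the (emp, mgr) pairs lexicographically; then one linear scan:
--     # an employee has more than one distinct manager iff two ADJACENT sorted
--     # pairs share that employee but differ in manager (duplicates sort together,
--     # so they never trigger it). Appending in scan order yields a sorted,
--     # duplicate-free result directly -- no dict or set needed.
--     out = []
--     prev = None
--     for emp, mgr in sorted(records):
--         if prev is not None and emp == prev[0] and mgr != prev[1] and (not out or out[-1] != emp):
--             out.append(emp)
--         prev = (emp, mgr)
--     return out
-- ===== Notes on version B (the rewrite author's own statement) =====
-- stated objective: alternative
-- what changed: Replaces A's dict-of-sets grouping plus final sort by sorting the raw (emp, mgr) pairs lexicographically once and doing a single linear scan that emits an employee exactly when two adjacent sorted pairs share the employee but differ in manager; no dict or set is built and the output is sorted and duplicate-free by construction.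
import Mathlib
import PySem

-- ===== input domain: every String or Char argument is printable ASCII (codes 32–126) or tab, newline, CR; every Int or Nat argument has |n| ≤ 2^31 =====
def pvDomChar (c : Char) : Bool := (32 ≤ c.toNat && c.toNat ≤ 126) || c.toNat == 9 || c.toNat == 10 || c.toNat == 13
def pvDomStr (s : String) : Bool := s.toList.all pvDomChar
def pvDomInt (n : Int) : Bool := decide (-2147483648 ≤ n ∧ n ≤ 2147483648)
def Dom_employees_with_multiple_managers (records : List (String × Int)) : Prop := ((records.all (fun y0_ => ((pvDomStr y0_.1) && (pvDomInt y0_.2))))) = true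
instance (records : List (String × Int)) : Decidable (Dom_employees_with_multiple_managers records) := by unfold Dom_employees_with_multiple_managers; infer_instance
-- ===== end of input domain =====

-- B replaces A's dict-of-sets grouping (plus final sort) by one lexicographic sort of the raw
-- pairs and a single linear scan over adjacent pairs; no dict or set is built (alternative algorithm).
-- ===== PORT A =====
def employees_with_multiple_managers (records : List (String × Int)) : List String :=
  let emp_to_managers : PySem.Dict String (PySem.Set Int) :=
    records.foldl (fun d p =>
      let d := if d.contains p.1 then d else d.insert p.1 PySem.Set.empty
      d.insert p.1 (PySem.Set.add (d.getD p.1 PySem.Set.empty) p.2)) PySem.Dict.empty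
  let result := (emp_to_managers.items.filter (fun q => 1 < PySem.Set.len q.2)).map (·.1)
  PySem.List.sorted result (fun x => x) false

-- ===== PORT B =====
-- the loop body of Source B: state = (out, prev); 'out[-1]' on a nonempty out is out.getLast?
def pvStepB (st : List String × Option (String × Int)) (p : String × Int) :
    List String × Option (String × Int) :=
  ((match st.2 with
    | some q =>
        if p.1 = q.1 ∧ p.2 ≠ q.2 ∧ (st.1 = [] ∨ st.1.getLast? ≠ some p.1)
        then st.1 ++ [p.1] else st.1
    | none => st.1), some p)

def employees_with_multiple_managers_alt (records : List (String × Int)) : List String :=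
  ((PySem.List.sorted2 records (·.1) (·.2) false).foldl pvStepB ([], none)).1

-- ===== PRECONDITION & SPEC =====
def Spec_employees_with_multiple_managers (records : List (String × Int)) (out : List String) : Prop := out = employees_with_multiple_managers_alt records
instance (records : List (String × Int)) (out : List String) : Decidable (Spec_employees_with_multiple_managers records out) := by unfold Spec_employees_with_multiple_managers; infer_instance

-- ===== CLAIM (what is proved, stated in full; the proofs are below) =====
def Claim_equal_employees_with_multiple_managers : Prop := ∀ (records : List (String × Int)), Dom_employees_with_multiple_managers records → Spec_employees_with_multiple_managers records (employees_with_multiple_managers records)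

-- ===== LEMMAS AND PROOFS =====

-- ---------- A side: the dict of manager-sets ----------
def pvStepA (d : PySem.Dict String (PySem.Set Int)) (p : String × Int) : PySem.Dict String (PySem.Set Int) :=
  let d := if d.contains p.1 then d else d.insert p.1 PySem.Set.empty
  d.insert p.1 (PySem.Set.add (d.getD p.1 PySem.Set.empty) p.2)

lemma pvStepA_getD (d : PySem.Dict String (PySem.Set Int)) (p : String × Int) (e : String) :
    (pvStepA d p).getD e PySem.Set.empty =
      if p.1 = e then PySem.Set.add (d.getD p.1 PySem.Set.empty) p.2 else d.getD e PySem.Set.empty := by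
  have hgd : (if d.contains p.1 then d else d.insert p.1 PySem.Set.empty).getD p.1 PySem.Set.empty
      = d.getD p.1 PySem.Set.empty := by
    by_cases hc : d.contains p.1
    · simp [hc]
    · rw [if_neg (by simpa using hc), PySem.Dict.getD_insert,
        PySem.Dict.getD_of_not_contains d PySem.Set.empty (by simpa using hc)]
      simp
  unfold pvStepA
  simp only [PySem.Dict.getD_insert, hgd]
  by_cases he : p.1 = e
  · simp [he]
  · rw [if_neg (fun h => he h.symm), if_neg he]
    by_cases hc : d.contains p.1
    · simp [hc]
    · rw [if_neg (by simpa using hc), PySem.Dict.getD_insert_of_ne _ _ _ (fun h => he h.symm)]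

lemma pvStepA_keys_nodup (d : PySem.Dict String (PySem.Set Int)) (p : String × Int)
    (h : d.keys.Nodup) : (pvStepA d p).keys.Nodup := by
  unfold pvStepA
  by_cases hc : d.contains p.1 <;> simp only [hc, if_true, if_false, Bool.false_eq_true] <;>
    first
    | exact PySem.Dict.nodup_keys_insert _ _ _ h
    | exact PySem.Dict.nodup_keys_insert _ _ _ (PySem.Dict.nodup_keys_insert _ _ _ h)

lemma pvStepA_contains (d : PySem.Dict String (PySem.Set Int)) (p : String × Int) (e : String) :
    (pvStepA d p).contains e = (d.contains e || p.1 == e) := by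
  unfold pvStepA
  by_cases hc : d.contains p.1 <;>
    simp [hc, PySem.Dict.contains_insert, Bool.or_comm, BEq.comm]

lemma pvFoldA_getD (l : List (String × Int)) (d : PySem.Dict String (PySem.Set Int)) (e : String) :
    (l.foldl pvStepA d).getD e PySem.Set.empty =
      PySem.Set.update (d.getD e PySem.Set.empty) ((l.filter (fun p => p.1 == e)).map (·.2)) := by
  induction l generalizing d with
  | nil => simp [PySem.Set.update]
  | cons p l ih =>
    rw [List.foldl_cons, ih]
    by_cases he : p.1 = e
    · rw [List.filter_cons_of_pos (by simp [he]), List.map_cons,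
        PySem.Set.update_cons, pvStepA_getD]
      simp [he]
    · rw [List.filter_cons_of_neg (by simp [he]), pvStepA_getD, if_neg he]

lemma pvFoldA_keys_nodup (l : List (String × Int)) (d : PySem.Dict String (PySem.Set Int))
    (h : d.keys.Nodup) : (l.foldl pvStepA d).keys.Nodup := by
  induction l generalizing d with
  | nil => exact h
  | cons p l ih => exact ih _ (pvStepA_keys_nodup _ _ h)

lemma pvFoldA_contains (l : List (String × Int)) (d : PySem.Dict String (PySem.Set Int)) (e : String) :
    (l.foldl pvStepA d).contains e = (d.contains e || l.any (fun p => p.1 == e)) := by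
  induction l generalizing d with
  | nil => simp
  | cons p l ih =>
    rw [List.foldl_cons, ih, pvStepA_contains]
    simp [Bool.or_assoc]

lemma pvCandA_mem (records : List (String × Int)) (e : String) :
    (e ∈ (((records.foldl pvStepA PySem.Dict.empty).items.filter (fun q => 1 < PySem.Set.len q.2)).map (·.1))) ↔
      1 < (PySem.Set.ofList ((records.filter (fun p => p.1 == e)).map (·.2))).length := by
  have hnd := pvFoldA_keys_nodup records PySem.Dict.empty (by simp [PySem.Dict.keys, PySem.Dict.empty])
  have hgetD : (records.foldl pvStepA PySem.Dict.empty).getD e PySem.Set.empty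
      = PySem.Set.ofList ((records.filter (fun p => p.1 == e)).map (·.2)) := by
    rw [pvFoldA_getD, PySem.Dict.getD_empty]
    exact PySem.Set.update_nil_left _
  constructor
  · rintro h
    simp only [List.mem_map, List.mem_filter] at h
    obtain ⟨⟨k, v⟩, ⟨hmem, hlen⟩, rfl⟩ := h
    have hget : (records.foldl pvStepA PySem.Dict.empty).get? k = some v :=
      (PySem.Dict.get?_eq_some_iff_mem_items _ _ _ hnd).2 hmem
    have : (records.foldl pvStepA PySem.Dict.empty).getD k PySem.Set.empty = v := by
      rw [PySem.Dict.getD_eq_get?_getD, hget]; rfl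
    rw [hgetD] at this
    simpa [PySem.Set.len, ← this] using hlen
  · intro h
    have hne : records.any (fun p => p.1 == e) = true := by
      by_contra hno
      have : (records.filter (fun p => p.1 == e)) = [] := by
        rw [List.filter_eq_nil_iff]
        intro p hp
        simp only [List.any_eq_true, not_exists] at hno
        exact fun hq => (hno p) ⟨hp, hq⟩
      rw [this] at h
      simp [PySem.Set.ofList] at h
    have hcont : (records.foldl pvStepA PySem.Dict.empty).contains e = true := by
      rw [pvFoldA_contains, hne]; simp
    obtain ⟨v, hget⟩ : ∃ v, (records.foldl pvStepA PySem.Dict.empty).get? e = some v := by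
      rcases hv : (records.foldl pvStepA PySem.Dict.empty).get? e with _ | v
      · rw [PySem.Dict.get?_eq_none_iff_contains] at hv; rw [hv] at hcont; cases hcont
      · exact ⟨v, rfl⟩
    have hveq : v = PySem.Set.ofList ((records.filter (fun p => p.1 == e)).map (·.2)) := by
      rw [← hgetD, PySem.Dict.getD_eq_get?_getD, hget]; rfl
    simp only [List.mem_map, List.mem_filter]
    exact ⟨(e, v), ⟨(PySem.Dict.get?_eq_some_iff_mem_items _ _ _ hnd).1 hget,
      by simpa [PySem.Set.len, hveq] using h⟩, rfl⟩

-- "e has more than one distinct manager" as a plain two-witness statement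
def pvMulti (records : List (String × Int)) (e : String) : Prop :=
  ∃ r ∈ records, ∃ s ∈ records, r.1 = e ∧ s.1 = e ∧ r.2 ≠ s.2

lemma pvSetLen_two_iff {α : Type} [BEq α] [LawfulBEq α] (xs : List α) :
    1 < (PySem.Set.ofList xs).length ↔ ∃ a ∈ xs, ∃ b ∈ xs, a ≠ b := by
  constructor
  · intro h
    rcases hS : (PySem.Set.ofList xs : List α) with _ | ⟨a, _ | ⟨b, t⟩⟩
    · rw [hS] at h; simp at h
    · rw [hS] at h; simp at h
    · have hnd := PySem.Set.nodup_ofList xs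
      rw [hS] at hnd
      have hab : a ≠ b := by
        intro hcontra; rw [hcontra] at hnd; simp at hnd
      have ha : a ∈ xs := (PySem.Set.mem_ofList _ _).1 (by rw [hS]; simp)
      have hb : b ∈ xs := (PySem.Set.mem_ofList _ _).1 (by rw [hS]; simp)
      exact ⟨a, ha, b, hb, hab⟩
  · rintro ⟨a, ha, b, hb, hab⟩
    have ha' : a ∈ (PySem.Set.ofList xs : List α) := (PySem.Set.mem_ofList _ _).2 ha
    have hb' : b ∈ (PySem.Set.ofList xs : List α) := (PySem.Set.mem_ofList _ _).2 hb
    rcases hS : (PySem.Set.ofList xs : List α) with _ | ⟨c, _ | ⟨d, t⟩⟩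
    · rw [hS] at ha'; simp at ha'
    · rw [hS] at ha' hb'
      simp at ha' hb'
      exact absurd (ha'.trans hb'.symm) hab
    · simp
  
lemma pvCandA_mem_multi (records : List (String × Int)) (e : String) :
    (e ∈ (((records.foldl pvStepA PySem.Dict.empty).items.filter (fun q => 1 < PySem.Set.len q.2)).map (·.1))) ↔
      pvMulti records e := by
  rw [pvCandA_mem, pvSetLen_two_iff]
  unfold pvMulti
  constructor
  · rintro ⟨a, ha, b, hb, hab⟩
    simp only [List.mem_map, List.mem_filter, beq_iff_eq] at ha hb
    obtain ⟨r, ⟨hr, hre⟩, rfl⟩ := ha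
    obtain ⟨s, ⟨hs, hse⟩, rfl⟩ := hb
    exact ⟨r, hr, s, hs, hre, hse, hab⟩
  · rintro ⟨r, hr, s, hs, hre, hse, hne⟩
    refine ⟨r.2, ?_, s.2, ?_, hne⟩ <;>
      simp only [List.mem_map, List.mem_filter, beq_iff_eq]
    · exact ⟨r, ⟨hr, hre⟩, rfl⟩
    · exact ⟨s, ⟨hs, hse⟩, rfl⟩

-- ---------- B side: the lexicographic sort and the adjacent-pair scan ----------

-- the comparator sorted2 uses on (String × Int), and the (non-strict) lexicographic order
def pvLexb (a b : String × Int) : Bool :=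
  decide (a.1 < b.1) || (!decide (b.1 < a.1) && decide (a.2 < b.2))

def pvLexle (a b : String × Int) : Prop :=
  a.1 < b.1 ∨ (a.1 = b.1 ∧ a.2 ≤ b.2)

lemma pvSorted2_eq (records : List (String × Int)) :
    PySem.List.sorted2 records (·.1) (·.2) false =
      records.foldl (fun acc x => PySem.List.insertBy pvLexb x acc) [] := rfl

lemma pvLexb_false_iff (a b : String × Int) : pvLexb a b = false ↔ pvLexle b a := by
  unfold pvLexb pvLexle
  rcases lt_trichotomy a.1 b.1 with h | h | h
  · simp [h, not_lt.2 (le_of_lt h), ne_of_gt h]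
  · simp [h, not_lt]
  · simp [h, not_lt.2 (le_of_lt h)]

lemma pvLexb_true_lexle (a b : String × Int) (h : pvLexb a b = true) : pvLexle a b := by
  unfold pvLexb at h
  unfold pvLexle
  simp only [Bool.or_eq_true, Bool.and_eq_true, Bool.not_eq_true', decide_eq_true_eq,
    decide_eq_false_iff_not] at h
  rcases h with h | ⟨h1, h2⟩
  · exact Or.inl h
  · rcases lt_or_eq_of_le (not_lt.1 h1) with h | h
    · exact Or.inl h
    · exact Or.inr ⟨h.symm ▸ rfl, le_of_lt h2⟩

lemma pvLexle_trans (a b c : String × Int) (h1 : pvLexle a b) (h2 : pvLexle b c) : pvLexle a c := by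
  unfold pvLexle at *
  rcases h1 with h1 | ⟨h1, h1'⟩ <;> rcases h2 with h2 | ⟨h2, h2'⟩
  · exact Or.inl (lt_trans h1 h2)
  · exact Or.inl (h2 ▸ h1)
  · exact Or.inl (h1 ▸ h2)
  · exact Or.inr ⟨h1.trans h2, le_trans h1' h2'⟩

lemma pvLexle_fst (a b : String × Int) (h : pvLexle a b) : a.1 ≤ b.1 := by
  rcases h with h | ⟨h, -⟩
  · exact le_of_lt h
  · exact le_of_eq h

lemma pvInsert_pairwise (x : String × Int) (ys : List (String × Int))
    (h : ys.Pairwise pvLexle) : (PySem.List.insertBy pvLexb x ys).Pairwise pvLexle := by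
  induction ys with
  | nil => simp [PySem.List.insertBy]
  | cons y t ih =>
    rw [List.pairwise_cons] at h
    obtain ⟨hy, ht⟩ := h
    unfold PySem.List.insertBy
    by_cases hb : pvLexb x y = true
    · rw [if_pos hb]
      have hxy : pvLexle x y := pvLexb_true_lexle _ _ hb
      refine List.pairwise_cons.2 ⟨?_, List.pairwise_cons.2 ⟨hy, ht⟩⟩
      intro z hz
      rcases List.mem_cons.1 hz with rfl | hz2
      · exact hxy
      · exact pvLexle_trans _ _ _ hxy (hy z hz2)
    · rw [if_neg hb]
      refine List.pairwise_cons.2 ⟨?_, ih ht⟩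
      intro z hz
      rcases (PySem.List.mem_insertBy _ _ _ _).1 hz with rfl | hz2
      · exact (pvLexb_false_iff _ _).1 (Bool.eq_false_iff.2 hb)
      · exact hy z hz2

lemma pvSorted2_pairwise (records : List (String × Int)) :
    (PySem.List.sorted2 records (·.1) (·.2) false).Pairwise pvLexle := by
  rw [pvSorted2_eq]
  suffices h : ∀ acc : List (String × Int), acc.Pairwise pvLexle →
      (records.foldl (fun acc x => PySem.List.insertBy pvLexb x acc) acc).Pairwise pvLexle by
    exact h [] (by simp)
  induction records with
  | nil => intro acc hacc; exact hacc
  | cons p t ih => intro acc hacc; exact ih _ (pvInsert_pairwise _ _ hacc)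

-- "some adjacent pair of the list has employee e with two different managers"
def pvAdjDiff : List (String × Int) → String → Prop
  | [], _ => False
  | [_], _ => False
  | p :: q :: l, e => (p.1 = e ∧ q.1 = e ∧ p.2 ≠ q.2) ∨ pvAdjDiff (q :: l) e

lemma pvAdjDiff_mem (l : List (String × Int)) (e : String) (h : pvAdjDiff l e) :
    ∃ r ∈ l, r.1 = e := by
  induction l with
  | nil => exact absurd h (by simp [pvAdjDiff])
  | cons p t ih =>
    cases t with
    | nil => exact absurd h (by simp [pvAdjDiff])
    | cons q l' =>
      rcases h with ⟨h1, -, -⟩ | h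
      · exact ⟨p, by simp, h1⟩
      · obtain ⟨r, hr, hre⟩ := ih h
        exact ⟨r, List.mem_cons_of_mem _ hr, hre⟩

-- in a lexicographically ordered list, an adjacent differing pair exists iff two witnesses exist
lemma pvAdjDiff_iff (l : List (String × Int)) (e : String) (hs : l.Pairwise pvLexle) :
    pvAdjDiff l e ↔ ∃ r ∈ l, ∃ s ∈ l, r.1 = e ∧ s.1 = e ∧ r.2 ≠ s.2 := by
  induction l with
  | nil => simp [pvAdjDiff]
  | cons p t ih =>
    cases t with
    | nil =>
      simp only [pvAdjDiff, false_iff]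
      rintro ⟨r, hr, s, hs', hre, hse, hne⟩
      simp only [List.mem_singleton] at hr hs'
      subst hr; subst hs'; exact hne rfl
    | cons q l' =>
      rw [List.pairwise_cons] at hs
      obtain ⟨hp, htl⟩ := hs
      constructor
      · rintro (⟨h1, h2, h3⟩ | h)
        · exact ⟨p, by simp, q, by simp, h1, h2, h3⟩
        · obtain ⟨r, hr, s, hs', h1, h2, h3⟩ := (ih htl).1 h
          exact ⟨r, List.mem_cons_of_mem _ hr, s, List.mem_cons_of_mem _ hs', h1, h2, h3⟩
      · rintro ⟨r, hr, s, hs', hre, hse, hne⟩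
        -- helper: a head witness (p with emp e) together with a tail witness forces q.1 = e
        have hq1 : ∀ s' ∈ q :: l', s'.1 = e → p.1 = e → q.1 = e := by
          intro s' hs'' hse' hpe
          have h1 : q.1 ≤ s'.1 := by
            rcases List.mem_cons.1 hs'' with rfl | hmem
            · exact le_refl _
            · exact pvLexle_fst _ _ ((List.pairwise_cons.1 htl).1 s' hmem)
          have h2 : p.1 ≤ q.1 := pvLexle_fst _ _ (hp q (by simp))
          exact le_antisymm (hse' ▸ h1) (hpe ▸ h2)
        have key : ∀ b ∈ q :: l', p.1 = e → b.1 = e → p.2 ≠ b.2 → pvAdjDiff (p :: q :: l') e := by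
          intro b hb hpe hbe hpb
          have hqe : q.1 = e := hq1 b hb hbe hpe
          rcases List.mem_cons.1 hb with rfl | hb2
          · exact Or.inl ⟨hpe, hqe, hpb⟩
          · by_cases hpq : p.2 = q.2
            · refine Or.inr ((ih htl).2 ⟨q, by simp, b, List.mem_cons_of_mem _ hb2, hqe, hbe, ?_⟩)
              rw [← hpq]; exact hpb
            · exact Or.inl ⟨hpe, hqe, hpq⟩
        rcases List.mem_cons.1 hr with rfl | hr2 <;> rcases List.mem_cons.1 hs' with rfl | hs2
        · exact absurd rfl hne
        · exact key s hs2 hre hse hne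
        · exact key r hr2 hse hre (Ne.symm hne)
        · exact Or.inr ((ih htl).2 ⟨r, hr2, s, hs2, hre, hse, hne⟩)

-- the scan, with the accumulator factored out: last = last emitted employee
def pvEmit : List (String × Int) → (String × Int) → Option String → List String
  | [], _, _ => []
  | p :: t, q, last =>
      if p.1 = q.1 ∧ p.2 ≠ q.2 ∧ last ≠ some p.1 then p.1 :: pvEmit t p (some p.1)
      else pvEmit t p last

lemma pvFoldB_eq_emit (l : List (String × Int)) (q : String × Int) (out : List String) :
    (l.foldl pvStepB (out, some q)).1 = out ++ pvEmit l q out.getLast? := by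
  induction l generalizing q out with
  | nil => simp [pvEmit]
  | cons p t ih =>
    have hcond : (p.1 = q.1 ∧ p.2 ≠ q.2 ∧ (out = [] ∨ out.getLast? ≠ some p.1)) ↔
        (p.1 = q.1 ∧ p.2 ≠ q.2 ∧ out.getLast? ≠ some p.1) := by
      constructor
      · rintro ⟨h1, h2, h3 | h3⟩
        · exact ⟨h1, h2, by simp [h3]⟩
        · exact ⟨h1, h2, h3⟩
      · rintro ⟨h1, h2, h3⟩; exact ⟨h1, h2, Or.inr h3⟩
    have hstep : pvStepB (out, some q) p =
        ((if p.1 = q.1 ∧ p.2 ≠ q.2 ∧ (out = [] ∨ out.getLast? ≠ some p.1)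
          then out ++ [p.1] else out), some p) := rfl
    by_cases hc : p.1 = q.1 ∧ p.2 ≠ q.2 ∧ out.getLast? ≠ some p.1
    · rw [List.foldl_cons, hstep, if_pos (hcond.2 hc), ih, List.getLast?_concat,
        show pvEmit (p :: t) q out.getLast? =
          (if p.1 = q.1 ∧ p.2 ≠ q.2 ∧ out.getLast? ≠ some p.1 then p.1 :: pvEmit t p (some p.1)
           else pvEmit t p out.getLast?) from rfl,
        if_pos hc]
      simp
    · rw [List.foldl_cons, hstep, if_neg (fun h => hc (hcond.1 h)), ih,
        show pvEmit (p :: t) q out.getLast? =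
          (if p.1 = q.1 ∧ p.2 ≠ q.2 ∧ out.getLast? ≠ some p.1 then p.1 :: pvEmit t p (some p.1)
           else pvEmit t p out.getLast?) from rfl,
        if_neg hc]

lemma pvEmit_mem (l : List (String × Int)) (q : String × Int) (last : Option String) (e : String)
    (hs : (q :: l).Pairwise pvLexle) (hlast : ∀ e0, last = some e0 → e0 ≤ q.1) :
    e ∈ pvEmit l q last ↔ pvAdjDiff (q :: l) e ∧ last ≠ some e := by
  induction l generalizing q last with
  | nil => simp [pvEmit, pvAdjDiff]
  | cons p t ih =>
    rw [List.pairwise_cons] at hs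
    obtain ⟨hq, htl⟩ := hs
    have hq1p1 : q.1 ≤ p.1 := pvLexle_fst _ _ (hq p (by simp))
    unfold pvEmit
    by_cases hc : p.1 = q.1 ∧ p.2 ≠ q.2 ∧ last ≠ some p.1
    · rw [if_pos hc]
      obtain ⟨hc1, hc2, hc3⟩ := hc
      rw [List.mem_cons, ih p (some p.1) htl
        (by intro e0 h; injection h with h2; exact le_of_eq h2.symm)]
      constructor
      · rintro (rfl | ⟨hadj, hne⟩)
        · exact ⟨Or.inl ⟨hc1.symm, rfl, fun h => hc2 h.symm⟩, hc3⟩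
        · refine ⟨Or.inr hadj, ?_⟩
          intro hle
          obtain ⟨r, hr, hre⟩ := pvAdjDiff_mem _ _ hadj
          have h1 : q.1 ≤ r.1 := pvLexle_fst _ _ (hq r hr)
          have h2 : e ≤ q.1 := hlast e hle
          have h3 : e = q.1 := le_antisymm h2 (hre ▸ h1)
          exact hne (by rw [h3, ← hc1])
      · rintro ⟨hadj, hne⟩
        by_cases hep : e = p.1
        · exact Or.inl hep
        · rcases hadj with ⟨h1, h2, h3⟩ | hadj
          · exact absurd h2.symm hep
          · exact Or.inr ⟨hadj, fun h => hep (Option.some.inj h).symm⟩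
    · rw [if_neg hc]
      rw [ih p last htl (fun e0 h => le_trans (hlast e0 h) hq1p1)]
      constructor
      · rintro ⟨hadj, hne⟩; exact ⟨Or.inr hadj, hne⟩
      · rintro ⟨⟨h1, h2, h3⟩ | hadj, hne⟩
        · -- the head clause contradicts ¬C given last ≠ some e
          exfalso
          apply hc
          refine ⟨h2 ▸ h1 ▸ rfl, ?_, ?_⟩
          · rw [show p.1 = q.1 from h2 ▸ h1 ▸ rfl] at *
            exact fun h => h3 h.symm
          · rw [show p.1 = e from h2]; exact hne
        · exact ⟨hadj, hne⟩

lemma pvEmit_sorted (l : List (String × Int)) (q : String × Int) (last : Option String)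
    (hs : (q :: l).Pairwise pvLexle) (hlast : ∀ e0, last = some e0 → e0 ≤ q.1) :
    (pvEmit l q last).Pairwise (· < ·) ∧
      (∀ e0, last = some e0 → ∀ e ∈ pvEmit l q last, e0 < e) := by
  induction l generalizing q last with
  | nil => simp [pvEmit]
  | cons p t ih =>
    rw [List.pairwise_cons] at hs
    obtain ⟨hq, htl⟩ := hs
    have hq1p1 : q.1 ≤ p.1 := pvLexle_fst _ _ (hq p (by simp))
    unfold pvEmit
    by_cases hc : p.1 = q.1 ∧ p.2 ≠ q.2 ∧ last ≠ some p.1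
    · rw [if_pos hc]
      obtain ⟨hc1, hc2, hc3⟩ := hc
      obtain ⟨ihp, ihl⟩ := ih p (some p.1) htl
        (by intro e0 h; injection h with h2; exact le_of_eq h2.symm)
      have hall : ∀ e ∈ pvEmit t p (some p.1), p.1 < e := ihl p.1 rfl
      refine ⟨List.pairwise_cons.2 ⟨hall, ihp⟩, ?_⟩
      rintro e0 rfl e he
      have he0 : e0 < p.1 := by
        rcases lt_or_eq_of_le (hlast e0 rfl |>.trans hq1p1) with h | h
        · exact h
        · exact absurd (by rw [h]) hc3
      rcases List.mem_cons.1 he with rfl | he2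
      · exact he0
      · exact lt_trans he0 (hall e he2)
    · rw [if_neg hc]
      exact ih p last htl (fun e0 h => le_trans (hlast e0 h) hq1p1)

-- ---------- assembly ----------

theorem pv_main (records : List (String × Int)) :
    employees_with_multiple_managers records = employees_with_multiple_managers_alt records := by
  have hAeq : employees_with_multiple_managers records =
      PySem.List.sorted (((records.foldl pvStepA PySem.Dict.empty).items.filter
        (fun q => 1 < PySem.Set.len q.2)).map (·.1)) (fun x => x) false := rfl
  have hBeq : employees_with_multiple_managers_alt records =
      ((PySem.List.sorted2 records (·.1) (·.2) false).foldl pvStepB ([], none)).1 := rfl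
  rw [hAeq, hBeq]
  have hperm : (PySem.List.sorted2 records (·.1) (·.2) false).Perm records :=
    PySem.List.sorted2_perm records _ _ false
  have hpair := pvSorted2_pairwise records
  rcases hsrt : PySem.List.sorted2 records (·.1) (·.2) false with _ | ⟨p, t⟩
  · -- sorted list empty ⇒ records = [] ⇒ both sides are []
    rw [hsrt] at hperm
    have hrec : records = [] := List.Perm.nil_eq hperm |>.symm
    subst hrec
    rfl
  · rw [hsrt] at hperm hpair
    -- B's value: first iteration only sets prev, then the scan is pvEmit
    have hB : ((p :: t).foldl pvStepB ([], none)).1 = pvEmit t p none := by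
      rw [List.foldl_cons,
        show pvStepB ([], none) p = (([] : List String), some p) from rfl,
        pvFoldB_eq_emit]
      simp
    rw [hB]
    -- A's value: sorted candidates; B's list is a strictly increasing rearrangement of them
    apply PySem.List.sorted_eq_of_perm_of_pairwise_lt
    · -- permutation: both lists are nodup with the same members (pvMulti)
      have hndA : (((records.foldl pvStepA PySem.Dict.empty).items.filter
          (fun q => 1 < PySem.Set.len q.2)).map (·.1)).Nodup := by
        have hnd := pvFoldA_keys_nodup records PySem.Dict.empty (by simp [PySem.Dict.keys, PySem.Dict.empty])
        exact (List.filter_sublist.map _).nodup hnd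
      have hsorted := pvEmit_sorted t p none hpair (fun e0 h => nomatch h)
      have hndB : (pvEmit t p none).Nodup := hsorted.1.imp ne_of_lt
      rw [List.perm_ext_iff_of_nodup hndB hndA]
      intro e
      rw [pvCandA_mem_multi records e,
        pvEmit_mem t p none e hpair (fun e0 h => nomatch h)]
      simp only [ne_eq, reduceCtorEq, not_false_eq_true, and_true]
      rw [pvAdjDiff_iff _ e hpair]
      unfold pvMulti
      constructor
      · rintro ⟨r, hr, s, hs, h⟩
        exact ⟨r, hperm.mem_iff.1 hr, s, hperm.mem_iff.1 hs, h⟩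
      · rintro ⟨r, hr, s, hs, h⟩
        exact ⟨r, hperm.mem_iff.2 hr, s, hperm.mem_iff.2 hs, h⟩
    · exact (pvEmit_sorted t p none hpair (fun e0 h => nomatch h)).1

-- ===== VERDICT (by name: the statement is the Claim_ definition above) =====
theorem employees_with_multiple_managers_spec : Claim_equal_employees_with_multiple_managers := by
  intro records _
  exact pv_main records
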